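-- pv_equiv track=rewrite | github.com/originaxiom/origin-axiom | stage2/obstruction_tests/src/analyze_static_frw_kernel_families_v1.py | family_mask
-- ===== SOURCE A (Python) =====
-- def family_mask(rows, name):
--     if name == "ALL_GRID":
--         return [True] * len(rows)
--     if name == "PRE_DATA_KERNEL":
--         return [r["in_pre_data_kernel"] == 1 for r in rows]
--     if name == "LCDM_LIKE":
--         return [r["lcdm_like"] == 1 for r in rows]
--     if name == "TOY_CORRIDOR":
--         return [r["in_toy_corridor"] == 1 for r in rows]
--     if name == "KERNEL_AND_LCDM":
--         return [(r["in_pre_data_kernel"] == 1 and r["lcdm_like"] == 1) for r in rows]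
--     if name == "KERNEL_AND_TOY":
--         return [(r["in_pre_data_kernel"] == 1 and r["in_toy_corridor"] == 1) for r in rows]
--     if name == "LCDM_AND_TOY":
--         return [(r["lcdm_like"] == 1 and r["in_toy_corridor"] == 1) for r in rows]
--     if name == "KERNEL_AND_LCDM_AND_TOY":
--         return [(r["in_pre_data_kernel"] == 1 and r["lcdm_like"] == 1 and r["in_toy_corridor"] == 1) for r in rows]
--     if name == "SHAPE_AND_VIABLE":
--         return [r["shape_and_viable"] == 1 for r in rows]
--     if name == "SHAPE_AND_LCDM":
--         return [r["shape_and_lcdm"] == 1 for r in rows]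
--     raise ValueError(f"Unknown family: {name}")
-- ===== SOURCE B (Python) =====
-- _FAMILY_KEYS = {
--     "ALL_GRID": [],
--     "PRE_DATA_KERNEL": ["in_pre_data_kernel"],
--     "LCDM_LIKE": ["lcdm_like"],
--     "TOY_CORRIDOR": ["in_toy_corridor"],
--     "KERNEL_AND_LCDM": ["in_pre_data_kernel", "lcdm_like"],
--     "KERNEL_AND_TOY": ["in_pre_data_kernel", "in_toy_corridor"],
--     "LCDM_AND_TOY": ["lcdm_like", "in_toy_corridor"],
--     "KERNEL_AND_LCDM_AND_TOY": ["in_pre_data_kernel", "lcdm_like", "in_toy_corridor"],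
--     "SHAPE_AND_VIABLE": ["shape_and_viable"],
--     "SHAPE_AND_LCDM": ["shape_and_lcdm"],
-- }
--
-- def family_mask(rows, name):
--     # Staged passes (loop interchange): start from an all-True mask, then for each
--     # flag key required by the family AND its column into the mask elementwise.
--     if name not in _FAMILY_KEYS:
--         raise ValueError(f"Unknown family: {name}")
--     mask = [True] * len(rows)
--     for k in _FAMILY_KEYS[name]:
--         mask = [m and r[k] == 1 for m, r in zip(mask, rows)]
--     return mask
-- ===== Notes on version B (the rewrite author's own statement) =====
-- stated objective: alternative
-- what changed: Replaces the ten-branch if-chain of bespoke per-row comprehensions with a loop interchange: keys for the family come from a static table and the mask is built by staged passes, one pass per required flag key ANDing that key's column into an all-True mask accumulator.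
import Mathlib
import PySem

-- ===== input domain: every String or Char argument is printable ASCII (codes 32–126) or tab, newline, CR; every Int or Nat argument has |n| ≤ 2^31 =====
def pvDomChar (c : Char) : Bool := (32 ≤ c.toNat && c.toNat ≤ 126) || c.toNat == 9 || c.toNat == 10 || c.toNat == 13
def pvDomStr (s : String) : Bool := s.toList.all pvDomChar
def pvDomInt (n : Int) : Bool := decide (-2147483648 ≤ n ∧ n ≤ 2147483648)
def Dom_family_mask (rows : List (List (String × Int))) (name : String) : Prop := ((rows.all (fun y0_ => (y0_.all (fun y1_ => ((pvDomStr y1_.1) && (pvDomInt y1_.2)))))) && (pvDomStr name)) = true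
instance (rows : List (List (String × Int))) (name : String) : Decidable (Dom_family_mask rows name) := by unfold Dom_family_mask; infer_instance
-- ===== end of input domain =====

-- B replaces A's ten per-row if-chain comprehensions with a loop interchange: staged
-- passes, one per required flag key, ANDing that key's column into an all-True mask.

-- ===== PORT A =====
-- literal transliteration of A's if-chain; a row dict is PySem.Dict.ofList of the pair list;
-- r[k] == 1 is ported as getD k 0 == 1, exact on Pre_ (keys A reads up to short-circuit are present)
def family_mask (rows : List (List (String × Int))) (name : String) : List Bool :=
  if name = "ALL_GRID" then List.replicate rows.length true
  else if name = "PRE_DATA_KERNEL" then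
    rows.map (fun r => (PySem.Dict.ofList r).getD "in_pre_data_kernel" 0 == 1)
  else if name = "LCDM_LIKE" then
    rows.map (fun r => (PySem.Dict.ofList r).getD "lcdm_like" 0 == 1)
  else if name = "TOY_CORRIDOR" then
    rows.map (fun r => (PySem.Dict.ofList r).getD "in_toy_corridor" 0 == 1)
  else if name = "KERNEL_AND_LCDM" then
    rows.map (fun r => (PySem.Dict.ofList r).getD "in_pre_data_kernel" 0 == 1
                    && (PySem.Dict.ofList r).getD "lcdm_like" 0 == 1)
  else if name = "KERNEL_AND_TOY" then
    rows.map (fun r => (PySem.Dict.ofList r).getD "in_pre_data_kernel" 0 == 1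
                    && (PySem.Dict.ofList r).getD "in_toy_corridor" 0 == 1)
  else if name = "LCDM_AND_TOY" then
    rows.map (fun r => (PySem.Dict.ofList r).getD "lcdm_like" 0 == 1
                    && (PySem.Dict.ofList r).getD "in_toy_corridor" 0 == 1)
  else if name = "KERNEL_AND_LCDM_AND_TOY" then
    rows.map (fun r => (PySem.Dict.ofList r).getD "in_pre_data_kernel" 0 == 1
                    && (PySem.Dict.ofList r).getD "lcdm_like" 0 == 1
                    && (PySem.Dict.ofList r).getD "in_toy_corridor" 0 == 1)
  else if name = "SHAPE_AND_VIABLE" then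
    rows.map (fun r => (PySem.Dict.ofList r).getD "shape_and_viable" 0 == 1)
  else if name = "SHAPE_AND_LCDM" then
    rows.map (fun r => (PySem.Dict.ofList r).getD "shape_and_lcdm" 0 == 1)
  else []  -- Python raises ValueError here; excluded by Pre_family_mask

-- ===== PORT B =====
-- the static table _FAMILY_KEYS of Source B
def pvFamilyKeys : PySem.Dict String (List String) := PySem.Dict.ofList
  [ ("ALL_GRID", [])
  , ("PRE_DATA_KERNEL", ["in_pre_data_kernel"])
  , ("LCDM_LIKE", ["lcdm_like"])
  , ("TOY_CORRIDOR", ["in_toy_corridor"])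
  , ("KERNEL_AND_LCDM", ["in_pre_data_kernel", "lcdm_like"])
  , ("KERNEL_AND_TOY", ["in_pre_data_kernel", "in_toy_corridor"])
  , ("LCDM_AND_TOY", ["lcdm_like", "in_toy_corridor"])
  , ("KERNEL_AND_LCDM_AND_TOY", ["in_pre_data_kernel", "lcdm_like", "in_toy_corridor"])
  , ("SHAPE_AND_VIABLE", ["shape_and_viable"])
  , ("SHAPE_AND_LCDM", ["shape_and_lcdm"]) ]

-- staged passes: foldl over the key list, each step ANDs that key's column into the mask;
-- r[k] == 1 ported as getD k 0 == 1, exact on Pre_ (a key B reads past a True mask entry is present)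
def family_mask_alt (rows : List (List (String × Int))) (name : String) : List Bool :=
  match pvFamilyKeys.get? name with
  | none => []  -- Python raises ValueError here; excluded by Pre_family_mask
  | some ks =>
    ks.foldl
      (fun mask k =>
        (mask.zip rows).map
          (fun p => p.1 && ((PySem.Dict.ofList p.2).getD k 0 == 1)))
      (List.replicate rows.length true)

-- ===== PRECONDITION & SPEC =====
-- which flag keys each family reads (helper of Pre_/Raises_ only)
def pvNeedKeys (name : String) : List String :=
  if name = "ALL_GRID" then []
  else if name = "PRE_DATA_KERNEL" then ["in_pre_data_kernel"]
  else if name = "LCDM_LIKE" then ["lcdm_like"]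
  else if name = "TOY_CORRIDOR" then ["in_toy_corridor"]
  else if name = "KERNEL_AND_LCDM" then ["in_pre_data_kernel", "lcdm_like"]
  else if name = "KERNEL_AND_TOY" then ["in_pre_data_kernel", "in_toy_corridor"]
  else if name = "LCDM_AND_TOY" then ["lcdm_like", "in_toy_corridor"]
  else if name = "KERNEL_AND_LCDM_AND_TOY" then ["in_pre_data_kernel", "lcdm_like", "in_toy_corridor"]
  else if name = "SHAPE_AND_VIABLE" then ["shape_and_viable"]
  else ["shape_and_lcdm"]

-- a row is evaluable for a key list iff each key is present up to the first flag that is not 1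
-- (Python's 'and' short-circuits, so later keys are never read past a non-1 flag)
def pvRowOk (d : PySem.Dict String Int) : List String → Bool
  | [] => true
  | k :: ks => d.contains k && (if d.getD k 0 == 1 then pvRowOk d ks else true)

-- Pre_ excludes exactly the inputs on which A raises: an unknown family name (ValueError)
-- and rows missing a flag key that the chosen family actually reads (KeyError).
def Pre_family_mask (rows : List (List (String × Int))) (name : String) : Prop :=
  name ∈ ["ALL_GRID", "PRE_DATA_KERNEL", "LCDM_LIKE", "TOY_CORRIDOR", "KERNEL_AND_LCDM",
          "KERNEL_AND_TOY", "LCDM_AND_TOY", "KERNEL_AND_LCDM_AND_TOY",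
          "SHAPE_AND_VIABLE", "SHAPE_AND_LCDM"] ∧
  ∀ r ∈ rows, pvRowOk (PySem.Dict.ofList r) (pvNeedKeys name) = true
instance (rows : List (List (String × Int))) (name : String) : Decidable (Pre_family_mask rows name) := by unfold Pre_family_mask; infer_instance

def pvWitness_family_mask : (List (List (String × Int))) × String :=
  ([[("in_pre_data_kernel", 1), ("lcdm_like", 0)]], "KERNEL_AND_LCDM")

def Spec_family_mask (rows : List (List (String × Int))) (name : String) (out : List Bool) : Prop := out = family_mask_alt rows name
instance (rows : List (List (String × Int))) (name : String) (out : List Bool) : Decidable (Spec_family_mask rows name out) := by unfold Spec_family_mask; infer_instance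

-- ===== CLAIM (what is proved, stated in full; the proofs are below) =====
def Claim_equal_family_mask : Prop := ∀ (rows : List (List (String × Int))) (name : String), Dom_family_mask rows name → Pre_family_mask rows name → Spec_family_mask rows name (family_mask rows name)

-- ===== LEMMAS AND PROOFS =====
theorem pv_zip_map_map (rows : List (List (String × Int)))
    (f : List (String × Int) → Bool) (k : String) :
    ((rows.map f).zip rows).map
        (fun p => p.1 && ((PySem.Dict.ofList p.2).getD k 0 == 1))
      = rows.map (fun r => f r && ((PySem.Dict.ofList r).getD k 0 == 1)) := by
  induction rows with
  | nil => rfl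
  | cons r rs ih => simp [ih]

-- ===== VERDICT (by name: the statement is the Claim_ definition above) =====
theorem pv_replicate_eq_map {α : Type} (rows : List α) :
    List.replicate rows.length true = rows.map (fun _ => true) := by
  induction rows with
  | nil => rfl
  | cons r rs ih => simp [List.replicate_succ, ih, -List.map_const']

theorem family_mask_spec : Claim_equal_family_mask := by
  intro rows name _ hpre
  obtain ⟨hmem, _⟩ := hpre
  unfold Spec_family_mask
  have h1 : pvFamilyKeys.get? "ALL_GRID" = some [] := rfl
  have h2 : pvFamilyKeys.get? "PRE_DATA_KERNEL" = some ["in_pre_data_kernel"] := rfl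
  have h3 : pvFamilyKeys.get? "LCDM_LIKE" = some ["lcdm_like"] := rfl
  have h4 : pvFamilyKeys.get? "TOY_CORRIDOR" = some ["in_toy_corridor"] := rfl
  have h5 : pvFamilyKeys.get? "KERNEL_AND_LCDM" = some ["in_pre_data_kernel", "lcdm_like"] := rfl
  have h6 : pvFamilyKeys.get? "KERNEL_AND_TOY" = some ["in_pre_data_kernel", "in_toy_corridor"] := rfl
  have h7 : pvFamilyKeys.get? "LCDM_AND_TOY" = some ["lcdm_like", "in_toy_corridor"] := rfl
  have h8 : pvFamilyKeys.get? "KERNEL_AND_LCDM_AND_TOY" = some ["in_pre_data_kernel", "lcdm_like", "in_toy_corridor"] := rfl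
  have h9 : pvFamilyKeys.get? "SHAPE_AND_VIABLE" = some ["shape_and_viable"] := rfl
  have h10 : pvFamilyKeys.get? "SHAPE_AND_LCDM" = some ["shape_and_lcdm"] := rfl
  fin_cases hmem <;>
    simp only [family_mask, family_mask_alt, reduceIte, String.reduceEq,
               h1, h2, h3, h4, h5, h6, h7, h8, h9, h10] <;>
    simp [pv_replicate_eq_map, pv_zip_map_map, Bool.and_assoc, -List.map_const']
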